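-- pv_equiv track=rewrite | github.com/dpriskorn/entitybase-backend | tests/rdf/conftest.py | split_subject_blocks
-- ===== SOURCE A (Python) =====
-- def split_subject_blocks(ttl: str) -> dict[str, str]:
--     """
--     Split TTL into blocks keyed by subject.
--     Assumes Wikidata-style formatting where subjects start lines.
--     """
--     blocks = {}
--     current_subject = None
--     current_lines = []
--
--     for line in ttl.splitlines():
--         if line and not line.startswith((" ", "\t")):
--             if current_subject:
--                 blocks[current_subject] = "\n".join(current_lines).strip()
--             current_subject = line.split()[0]
--             current_lines = [line]
--         else:
--             current_lines.append(line)
--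
--     if current_subject:
--         blocks[current_subject] = "\n".join(current_lines).strip()
--
--     return blocks
-- ===== SOURCE B (Python) =====
-- def _is_subject(line):
--     return bool(line) and line[0] not in (" ", "\t")
--
--
-- def _scan(lines, i):
--     """Advance i past consecutive non-subject lines."""
--     while i < len(lines) and not _is_subject(lines[i]):
--         i += 1
--     return i
--
--
-- def split_subject_blocks(ttl: str) -> dict[str, str]:
--     """
--     Split TTL into blocks keyed by subject.
--
--     Segment-slicing re-implementation: locate each subject line's segment
--     (the subject line plus its continuation lines) by index scans, then
--     build the dict from the (subject, segment) pairs in one go.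
--     """
--     lines = ttl.splitlines()
--     pairs = []
--     i = _scan(lines, 0)  # skip everything before the first subject line
--     while i < len(lines):
--         j = _scan(lines, i + 1)
--         pairs.append((lines[i].split()[0], "\n".join(lines[i:j]).strip()))
--         i = j
--     return dict(pairs)
-- ===== Notes on version B (the rewrite author's own statement) =====
-- stated objective: alternative
-- what changed: A accumulates current_subject/current_lines and flushes a block into the dict each time the next subject line arrives; B instead scans indices to cut the line list into one segment per subject line and builds the dict from the (subject, segment) pairs at the end.
import Mathlib
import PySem

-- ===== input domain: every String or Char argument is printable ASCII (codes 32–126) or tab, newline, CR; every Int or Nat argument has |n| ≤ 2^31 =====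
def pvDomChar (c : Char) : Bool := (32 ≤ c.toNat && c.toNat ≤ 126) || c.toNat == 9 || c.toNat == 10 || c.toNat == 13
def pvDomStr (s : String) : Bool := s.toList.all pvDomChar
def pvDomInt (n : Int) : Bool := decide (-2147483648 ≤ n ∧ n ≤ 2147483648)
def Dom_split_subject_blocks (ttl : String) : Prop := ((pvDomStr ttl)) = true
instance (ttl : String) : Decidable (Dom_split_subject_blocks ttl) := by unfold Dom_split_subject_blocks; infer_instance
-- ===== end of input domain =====

-- B replaces A's flush-on-next-subject accumulator loop by index scans that cut the
-- line list into one segment per subject line, building the dict from the pairs at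
-- the end (alternative decomposition, same asymptotic cost).


-- ===== PORT A =====
-- 'line and not line.startswith((" ", "\t"))'
def pvIsSubjA (line : String) : Bool :=
  (!(line == "")) && !(PySem.Str.startswith line " " || PySem.Str.startswith line "\t")

-- '"\n".join(acc).strip()' (shared by both ports: both Pythons use this very expression)
def pvJoinStrip (acc : List String) : String := PySem.Str.strip (PySem.Str.join "\n" acc)

-- 'line.split()[0]' — s[0] via pyGet?; '.getD ""' is unreachable on Dom (a subject
-- line starts with a printable non-space char, so split() is never empty there)
def pvFirstWord (line : String) : String :=
  (PySem.List.pyGet? (PySem.Str.split₀ line) 0).getD ""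

-- 'if current_subject: blocks[current_subject] = "\n".join(current_lines).strip()'
-- (Python truthiness: None and "" both skip)
def pvFlushA (blocks : PySem.Dict String String) (cs : Option String) (acc : List String) :
    PySem.Dict String String :=
  match cs with
  | some s => if !(s == "") then blocks.insert s (pvJoinStrip acc) else blocks
  | none => blocks

def pvStepA (st : PySem.Dict String String × Option String × List String) (line : String) :
    PySem.Dict String String × Option String × List String :=
  if pvIsSubjA line then
    (pvFlushA st.1 st.2.1 st.2.2, some (pvFirstWord line), [line])
  else (st.1, st.2.1, st.2.2 ++ [line])

def split_subject_blocks (ttl : String) : List (String × String) :=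
  let st := (PySem.Str.splitlines ttl).foldl pvStepA (PySem.Dict.empty, none, [])
  (pvFlushA st.1 st.2.1 st.2.2).items

-- ===== PORT B =====
-- '_is_subject': 'bool(line) and line[0] not in (" ", "\t")' (line[0] guarded by bool(line))
def pvIsSubjB (line : String) : Bool :=
  (!(line == "")) &&
    (match PySem.Str.pyGet? line 0 with
     | some c => !(c == ' ') && !(c == '\t')
     | none => false)

-- '_scan': 'while i < len(lines) and not _is_subject(lines[i]): i += 1' (lines[i] guarded by i < len)
def pvScan (lines : List String) (i : Nat) : Nat :=
  if i < lines.length ∧ ¬ pvIsSubjB ((PySem.List.pyGet? lines (i : Int)).getD "") then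
    pvScan lines (i + 1)
  else i
termination_by lines.length - i
decreasing_by omega

-- the outer while loop building 'pairs'; 'lines[i:j]' is PySem.List.slice
theorem pvScan_ge (lines : List String) (i : Nat) : i ≤ pvScan lines i := by
  fun_induction pvScan lines i with
  | case1 i h ih => omega
  | case2 i h => omega

def pvSegs (lines : List String) (i : Nat) : List (String × String) :=
  if h : i < lines.length then
    let j := pvScan lines (i + 1)
    (pvFirstWord ((PySem.List.pyGet? lines (i : Int)).getD ""),
      pvJoinStrip (PySem.List.slice lines (some (i : Int)) (some (j : Int)))) :: pvSegs lines j
  else []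
termination_by lines.length - i
decreasing_by have := pvScan_ge lines (i + 1); omega

def split_subject_blocks_alt (ttl : String) : List (String × String) :=
  let lines := PySem.Str.splitlines ttl
  (PySem.Dict.ofList (pvSegs lines (pvScan lines 0))).items

-- ===== PRECONDITION & SPEC =====
def Spec_split_subject_blocks (ttl : String) (out : List (String × String)) : Prop := out = split_subject_blocks_alt ttl
instance (ttl : String) (out : List (String × String)) : Decidable (Spec_split_subject_blocks ttl out) := by unfold Spec_split_subject_blocks; infer_instance

-- ===== CLAIM (what is proved, stated in full; the proofs are below) =====
def Claim_equal_split_subject_blocks : Prop := ∀ (ttl : String), Dom_split_subject_blocks ttl → Spec_split_subject_blocks ttl (split_subject_blocks ttl)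

-- ===== LEMMAS AND PROOFS =====

theorem pv_take_takeWhile {α : Type} (p : α → Bool) (l : List α) :
    l.take ((l.takeWhile p).length) = l.takeWhile p := by
  induction l with
  | nil => simp
  | cons a l ih => by_cases h : p a <;> simp [List.takeWhile_cons, h, ih]

theorem pv_drop_takeWhile {α : Type} (p : α → Bool) (l : List α) :
    l.drop ((l.takeWhile p).length) = l.dropWhile p := by
  induction l with
  | nil => simp
  | cons a l ih => by_cases h : p a <;> simp [List.takeWhile_cons, List.dropWhile_cons, h, ih]


theorem pv_subjB_eq_subjA (line : String) : pvIsSubjB line = pvIsSubjA line := by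
  unfold pvIsSubjA pvIsSubjB
  have h0 : (line == "") = (line.toList == []) := by
    cases hb : line == "" <;> cases hc : line.toList == ([]:List Char) <;> simp_all
  have h1 : PySem.Str.startswith line " " = PySem.Chars.startswith line.toList [' '] := rfl
  have h2 : PySem.Str.startswith line "\t" = PySem.Chars.startswith line.toList ['\t'] := rfl
  have h3 : PySem.Str.pyGet? line 0 = PySem.List.pyGet? line.toList 0 := by simp
  rw [h0, h1, h2, h3]
  cases hl : line.toList with
  | nil => simp
  | cons c rest =>
    simp [PySem.List.pyGet?, PySem.Chars.startswith, PySem.List.pyIdx?]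
    cases hc : c == ' ' <;> cases hct : c == '\t' <;> simp_all [List.isPrefixOf]
    constructor
    · exact fun h => hc h.symm
    · exact fun h => hct h.symm

-- the two char-scanning loops agree with takeWhile/dropWhile
theorem pvScan_spec (lines : List String) (i : Nat) :
    pvScan lines i = i + ((lines.drop i).takeWhile (fun l => !pvIsSubjA l)).length := by
  fun_induction pvScan lines i with
  | case1 i h ih =>
    obtain ⟨hlt, hsub⟩ := h
    rw [ih]
    have hd : lines.drop i = lines[i] :: lines.drop (i + 1) := List.drop_eq_getElem_cons hlt
    have hget : (PySem.List.pyGet? lines (i : Int)).getD "" = lines[i] := by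
      rw [PySem.List.pyGet?_natCast, List.getElem?_eq_getElem hlt]; rfl
    rw [hget, pv_subjB_eq_subjA] at hsub
    rw [hd, List.takeWhile_cons]
    simp [hsub]
    omega
  | case2 i h =>
    by_cases hlt : i < lines.length
    · have hsub : pvIsSubjB ((PySem.List.pyGet? lines (i : Int)).getD "") = true := by
        by_contra hn
        exact h ⟨hlt, by simpa using hn⟩
      have hget : (PySem.List.pyGet? lines (i : Int)).getD "" = lines[i] := by
        rw [PySem.List.pyGet?_natCast, List.getElem?_eq_getElem hlt]; rfl
      rw [hget, pv_subjB_eq_subjA] at hsub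
      rw [List.drop_eq_getElem_cons hlt, List.takeWhile_cons]
      simp [hsub]
    · rw [List.drop_eq_nil_of_le (by omega)]
      simp

-- reference recursion: one segment per leading subject line
def pvSegsSpec (lines : List String) : List (String × String) :=
  match lines with
  | [] => []
  | l :: rest =>
    (pvFirstWord l, pvJoinStrip (l :: rest.takeWhile (fun x => !pvIsSubjA x))) ::
      pvSegsSpec (rest.dropWhile (fun x => !pvIsSubjA x))
termination_by lines.length
decreasing_by simp; have := List.length_dropWhile_le (fun x => !pvIsSubjA x) rest; omega

theorem pvSegs_eq_spec (lines : List String) (i : Nat) :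
    pvSegs lines i = pvSegsSpec (lines.drop i) := by
  fun_induction pvSegs lines i with
  | case1 i hlt j ih =>
    have hd : lines.drop i = lines[i] :: lines.drop (i + 1) := List.drop_eq_getElem_cons hlt
    have hget : (PySem.List.pyGet? lines (i : Int)).getD "" = lines[i] := by
      rw [PySem.List.pyGet?_natCast, List.getElem?_eq_getElem hlt]; rfl
    have hj : j = (i + 1) + (List.takeWhile (fun l => !pvIsSubjA l) (lines.drop (i + 1))).length :=
      pvScan_spec lines (i + 1)
    have hslice : PySem.List.slice lines (some (i : Int)) (some (j : Int)) =
        lines[i] :: List.takeWhile (fun x => !pvIsSubjA x) (lines.drop (i + 1)) := by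
      rw [PySem.List.slice_natCast, hd]
      have : j - i = (List.takeWhile (fun l => !pvIsSubjA l) (lines.drop (i + 1))).length + 1 := by
        omega
      rw [this, List.take_succ_cons, pv_take_takeWhile]
    have hdropj : lines.drop j = List.dropWhile (fun x => !pvIsSubjA x) (lines.drop (i + 1)) := by
      rw [hj, ← List.drop_drop, pv_drop_takeWhile]
    rw [hd, pvSegsSpec, hget, hslice, ih, hdropj]
  | case2 i hnlt =>
    rw [List.drop_eq_nil_of_le (by omega), pvSegsSpec]

theorem pvSegsSpec_cons (l : String) (rest : List String) :
    pvSegsSpec (l :: rest) =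
      (pvFirstWord l, pvJoinStrip (l :: rest.takeWhile (fun x => !pvIsSubjA x))) ::
        pvSegsSpec (rest.dropWhile (fun x => !pvIsSubjA x)) := by rw [pvSegsSpec]

theorem pv_update_cons {κ ν : Type} [BEq κ] (d : PySem.Dict κ ν) (p : κ × ν) (ps : List (κ × ν)) :
    PySem.Dict.update d (p :: ps) = PySem.Dict.update (d.insert p.1 p.2) ps := rfl

-- A's fold, from a live subject
theorem pvFoldA_some (rest : List String) (s : String) (acc : List String)
    (d : PySem.Dict String String) (hs : s ≠ "")
    (hG : ∀ l ∈ rest, pvIsSubjA l = true → pvFirstWord l ≠ "") :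
    (fun st => pvFlushA st.1 st.2.1 st.2.2) (rest.foldl pvStepA (d, some s, acc)) =
      PySem.Dict.update
        (d.insert s (pvJoinStrip (acc ++ rest.takeWhile (fun x => !pvIsSubjA x))))
        (pvSegsSpec (rest.dropWhile (fun x => !pvIsSubjA x))) := by
  induction rest generalizing s acc d with
  | nil =>
    simp [pvFlushA, pvSegsSpec, PySem.Dict.update, hs]
  | cons r rest ih =>
    by_cases hr : pvIsSubjA r = true
    · have hkey : pvFirstWord r ≠ "" := hG r (by simp) hr
      have hstep : pvStepA (d, some s, acc) r =
          (d.insert s (pvJoinStrip acc), some (pvFirstWord r), [r]) := by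
        simp [pvStepA, hr, pvFlushA, hs]
      rw [List.foldl_cons, hstep,
        ih (pvFirstWord r) [r] _ hkey (fun l hl hsu => hG l (by simp [hl]) hsu)]
      simp [hr, pvSegsSpec_cons, pv_update_cons]
    · have hstep : pvStepA (d, some s, acc) r = (d, some s, acc ++ [r]) := by
        simp [pvStepA, hr]
      rw [List.foldl_cons, hstep,
        ih s (acc ++ [r]) d hs (fun l hl hsu => hG l (by simp [hl]) hsu)]
      simp [hr]

-- A's fold, before any subject
theorem pvFoldA_none (lines : List String) (acc : List String)
    (d : PySem.Dict String String)
    (hG : ∀ l ∈ lines, pvIsSubjA l = true → pvFirstWord l ≠ "") :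
    (fun st => pvFlushA st.1 st.2.1 st.2.2) (lines.foldl pvStepA (d, none, acc)) =
      PySem.Dict.update d (pvSegsSpec (lines.dropWhile (fun x => !pvIsSubjA x))) := by
  induction lines generalizing acc with
  | nil => simp [pvFlushA, pvSegsSpec, PySem.Dict.update]
  | cons l ls ih =>
    by_cases hl : pvIsSubjA l = true
    · have hkey : pvFirstWord l ≠ "" := hG l (by simp) hl
      have hstep : pvStepA (d, none, acc) l = (d, some (pvFirstWord l), [l]) := by
        simp [pvStepA, hl, pvFlushA]
      rw [List.foldl_cons, hstep,
        pvFoldA_some ls (pvFirstWord l) [l] d hkey (fun x hx hsu => hG x (by simp [hx]) hsu)]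
      simp [hl, pvSegsSpec_cons, pv_update_cons]
    · have hstep : pvStepA (d, none, acc) l = (d, none, acc ++ [l]) := by
        simp [pvStepA, hl]
      rw [List.foldl_cons, hstep, ih (acc ++ [l]) (fun x hx hsu => hG x (by simp [hx]) hsu)]
      simp [hl]


theorem pv_go_chars (isB : Char → Bool) (Q : Char → Prop) :
    ∀ (n : Nat) (s cur : List Char) (acc : List (List Char)), s.length ≤ n →
    (∀ c ∈ s, isB c = false → Q c) → (∀ c ∈ cur, Q c) → (∀ l ∈ acc, ∀ c ∈ l, Q c) →
    ∀ l ∈ PySem.Chars.splitlines.go isB s cur acc, ∀ c ∈ l, Q c := by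
  intro n
  induction n with
  | zero =>
    intro s cur acc hlen hs hcur hacc
    have hs0 : s = [] := by cases s <;> simp_all
    subst hs0
    rw [PySem.Chars.splitlines.go]
    split
    · intro l hl c hc; exact hacc l (by simpa using hl) c hc
    · intro l hl c hc
      simp at hl
      rcases hl with h | h
      · exact hacc l h c hc
      · exact hcur c (by subst h; simpa using hc)
  | succ n ih =>
    intro s cur acc hlen hs hcur hacc
    rw [PySem.Chars.splitlines.go.eq_def]
    split
    · -- s = []
      split
      · intro l hl c hc; exact hacc l (by simpa using hl) c hc
      · intro l hl c hc
        simp at hl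
        rcases hl with h | h
        · exact hacc l h c hc
        · exact hcur c (by subst h; simpa using hc)
    · -- '\r' :: '\n' :: rest
      rename_i rest
      apply ih rest [] (cur.reverse :: acc)
      · simp at hlen; omega
      · intro c hc hb; exact hs c (by simp [hc]) hb
      · simp
      · intro l hl c hc
        simp at hl
        rcases hl with h | h
        · exact hcur c (by subst h; simpa using hc)
        · exact hacc l h c hc
    · -- c :: rest, general
      rename_i c rest _
      split
      · apply ih rest [] (cur.reverse :: acc)
        · simp at hlen; omega
        · intro x hx hb; exact hs x (by simp [hx]) hb
        · simp
        · intro l hl x hx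
          simp at hl
          rcases hl with h | h
          · exact hcur x (by subst h; simpa using hx)
          · exact hacc l h x hx
      · rename_i hb
        apply ih rest (c :: cur) acc
        · simp at hlen; omega
        · intro x hx hxb; exact hs x (by simp [hx]) hxb
        · intro x hx
          rcases List.mem_cons.1 hx with h | h
          · subst h; exact hs x (by simp) (by simpa using hb)
          · exact hcur x h
        · exact hacc

-- the break-character test splitlines uses (defeq to its internal closure)
def pvBreak (c : Char) : Bool :=
  decide (c.toNat = 10) || decide (c.toNat = 13) || decide (c.toNat = 11) || decide (c.toNat = 12) ||
    decide (c.toNat = 28) || decide (c.toNat = 29) || decide (c.toNat = 30) || decide (c.toNat = 133) ||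
    decide (c.toNat = 8232) || decide (c.toNat = 8233)

theorem pv_splitlines_eq_go (s : List Char) :
    PySem.Chars.splitlines s = PySem.Chars.splitlines.go pvBreak s [] [] := rfl

theorem pv_head_not_space (c : Char) (hdom : pvDomChar c = true) (hbrk : pvBreak c = false)
    (h1 : c ≠ ' ') (h2 : c ≠ '\t') : PySem.Chars.isspace c = false := by
  have e1 : c.toNat ≠ 32 := fun h => h1 (by have := Char.ofNat_toNat c; rw [h] at this; exact this.symm)
  have e2 : c.toNat ≠ 9 := fun h => h2 (by have := Char.ofNat_toNat c; rw [h] at this; exact this.symm)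
  simp [pvDomChar] at hdom
  simp [pvBreak] at hbrk
  simp [PySem.Chars.isspace]
  omega

theorem pv_split₀_go_acc : ∀ (s cur : List Char) (acc : List (List Char)),
    PySem.Chars.split₀.go s cur acc = acc.reverse ++ PySem.Chars.split₀.go s cur [] := by
  intro s
  induction s with
  | nil =>
    intro cur acc
    rw [PySem.Chars.split₀.go, PySem.Chars.split₀.go]
    by_cases h : cur.isEmpty <;> simp [h]
  | cons c rest ih =>
    intro cur acc
    rw [PySem.Chars.split₀.go]
    conv_rhs => rw [PySem.Chars.split₀.go]
    by_cases hsp : PySem.Chars.isspace c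
    · by_cases hcur : cur.isEmpty = true
      · simp only [hsp, hcur, if_true]
        exact ih [] acc
      · simp only [hsp, hcur, if_true, if_false, Bool.false_eq_true]
        rw [ih [] (cur.reverse :: acc), ih [] [cur.reverse]]
        simp
    · simp only [hsp, Bool.false_eq_true, if_false]
      exact ih (c :: cur) acc

theorem pv_split₀_go_head : ∀ (s cur : List Char), cur ≠ [] →
    ∃ w ws, PySem.Chars.split₀.go s cur [] = w :: ws ∧ w ≠ [] := by
  intro s
  induction s with
  | nil =>
    intro cur hcur
    rw [PySem.Chars.split₀.go]
    simp [hcur]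
  | cons c rest ih =>
    intro cur hcur
    rw [PySem.Chars.split₀.go]
    by_cases hsp : PySem.Chars.isspace c
    · have hce : cur.isEmpty = false := by simpa using hcur
      simp only [hsp, if_true, hce, Bool.false_eq_true, if_false]
      rw [pv_split₀_go_acc rest [] [cur.reverse]]
      exact ⟨cur.reverse, PySem.Chars.split₀.go rest [] [], by simp [hcur]⟩
    · simp only [hsp, Bool.false_eq_true, if_false]
      exact ih (c :: cur) (by simp)

-- on Dom, every subject line has a nonempty first word
theorem pv_goodlines (ttl : String) (hD : Dom_split_subject_blocks ttl) :
    ∀ l ∈ PySem.Str.splitlines ttl, pvIsSubjA l = true → pvFirstWord l ≠ "" := by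
  intro l hl hsub
  obtain ⟨lc, hlc, rfl⟩ : ∃ lc, lc ∈ PySem.Chars.splitlines ttl.toList ∧ String.ofList lc = l := by
    simpa [PySem.Str.splitlines] using hl
  have hchars : ∀ c ∈ lc, pvDomChar c = true ∧ pvBreak c = false := by
    intro c hc
    refine pv_go_chars pvBreak (fun c => pvDomChar c = true ∧ pvBreak c = false)
      ttl.toList.length ttl.toList [] [] le_rfl ?_ (by simp) (by simp)
      lc (by rw [← pv_splitlines_eq_go]; exact hlc) c hc
    intro x hx hb
    have hD' : ∀ x ∈ ttl.toList, pvDomChar x = true := by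
      simpa [Dom_split_subject_blocks, pvDomStr, List.all_eq_true] using hD
    exact ⟨hD' x hx, hb⟩
  unfold pvIsSubjA at hsub
  simp only [Bool.and_eq_true, Bool.not_eq_true', Bool.or_eq_false_iff] at hsub
  have hne := hsub.1
  have hsw1 := hsub.2.1
  have hsw2 := hsub.2.2
  have hlcne : lc ≠ [] := by
    intro h; subst h; simp at hne
  obtain ⟨c, cs, rfl⟩ := List.exists_cons_of_ne_nil hlcne
  have hcne : c ≠ ' ' := by
    intro h
    have he : PySem.Str.startswith (String.ofList (c :: cs)) " " =
        PySem.Chars.startswith (c :: cs) [' '] := by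
      show PySem.Chars.startswith (String.ofList (c :: cs)).toList [' '] = _
      rw [String.toList_ofList]
    rw [he] at hsw1
    subst h
    simp [PySem.Chars.startswith, List.isPrefixOf] at hsw1
  have hcnt : c ≠ '\t' := by
    intro h
    have he : PySem.Str.startswith (String.ofList (c :: cs)) "\t" =
        PySem.Chars.startswith (c :: cs) ['\t'] := by
      show PySem.Chars.startswith (String.ofList (c :: cs)).toList ['\t'] = _
      rw [String.toList_ofList]
    rw [he] at hsw2
    subst h
    simp [PySem.Chars.startswith, List.isPrefixOf] at hsw2
  have hhead := hchars c (by simp)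
  have hspace : PySem.Chars.isspace c = false :=
    pv_head_not_space c hhead.1 hhead.2 hcne hcnt
  have hsplit : ∃ w ws, PySem.Chars.split₀ (c :: cs) = w :: ws ∧ w ≠ [] := by
    unfold PySem.Chars.split₀
    rw [PySem.Chars.split₀.go]
    simp only [hspace, Bool.false_eq_true, if_false]
    exact pv_split₀_go_head cs [c] (by simp)
  obtain ⟨w, ws, hw, hwne⟩ := hsplit
  unfold pvFirstWord
  have hsp : PySem.Str.split₀ (String.ofList (c :: cs)) =
      String.ofList w :: ws.map String.ofList := by
    unfold PySem.Str.split₀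
    rw [String.toList_ofList, hw]; simp
  rw [hsp]
  have hg : PySem.List.pyGet? (String.ofList w :: ws.map String.ofList) 0 =
      some (String.ofList w) := by
    have h0 := PySem.List.pyGet?_natCast (String.ofList w :: ws.map String.ofList) 0
    simpa using h0
  rw [hg]
  simp only [Option.getD_some]
  intro h
  exact hwne (by have := congrArg String.toList h; simpa using this)

-- ===== VERDICT (by name: the statement is the Claim_ definition above) =====
theorem split_subject_blocks_spec : Claim_equal_split_subject_blocks := by
  intro ttl hD
  have hG := pv_goodlines ttl hD
  have h1 := pvFoldA_none (PySem.Str.splitlines ttl) [] PySem.Dict.empty hG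
  simp only at h1
  have h2 : pvSegs (PySem.Str.splitlines ttl) (pvScan (PySem.Str.splitlines ttl) 0)
      = pvSegsSpec ((PySem.Str.splitlines ttl).dropWhile (fun x => !pvIsSubjA x)) := by
    rw [pvScan_spec, pvSegs_eq_spec]
    simp [pv_drop_takeWhile]
  show split_subject_blocks ttl = split_subject_blocks_alt ttl
  unfold split_subject_blocks split_subject_blocks_alt
  simp only [h2, h1]
  rfl
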